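-- pv_equiv track=rewrite | github.com/goldflower/nctu_TOC17 | proj3/Fib2x3Solver.py | movable
-- ===== SOURCE A (Python) =====
-- fib = [0, 1, 2, 3, 5, 8, 13, 21, 34, 55, 89, 144, 233, 377, 610]
--
-- def movable(arrayBoard):
--     # 檢查上下
--     add1 = arrayBoard[0][0] + arrayBoard[1][0]
--     add2 = arrayBoard[0][1] + arrayBoard[1][1]
--     add3 = arrayBoard[0][2] + arrayBoard[1][2]
--     flag_UD = (add1 in fib and add1 > arrayBoard[0][0] and add1 > arrayBoard[1][0]) or \
--               (add2 in fib and add2 > arrayBoard[0][1] and add2 > arrayBoard[1][1]) or \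
--               (add3 in fib and add3 > arrayBoard[0][2] and add3 > arrayBoard[1][2])
--     if flag_UD:
--         return True
--
--     for i in range(2):
--         # 檢查左右
--         add1 = arrayBoard[i][0] + arrayBoard[i][1]
--         add2 = arrayBoard[i][1] + arrayBoard[i][2]
--         add3 = arrayBoard[i][0] + arrayBoard[i][2]
--         flag_LR = (add1 in fib and add1 > arrayBoard[i][0] and add1 > arrayBoard[i][1]) or \
--                   (add2 in fib and add2 > arrayBoard[i][1] and add2 > arrayBoard[i][2]) or \
--                   (add3 in fib and add3 > arrayBoard[i][0] and add3 > arrayBoard[i][2] and arrayBoard[i][1] == 0)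
--         if flag_LR:
--             return True
--
--
--         for j in range(3):
--             # 有0必定可移動
--             if arrayBoard[i][j] == 0:
--                 return True
--
--     return False
-- ===== SOURCE B (Python) =====
-- fib = [0, 1, 2, 3, 5, 8, 13, 21, 34, 55, 89, 144, 233, 377, 610]
-- _FIB = set(fib)
--
-- def _ok(a, b):
--     # a pair is "productive" iff one tile is empty, or both are positive and
--     # their sum is Fibonacci (since a+b > a <=> b > 0 and a+b > b <=> a > 0)
--     return a == 0 or b == 0 or (a > 0 and b > 0 and a + b in _FIB)
--
-- def movable(arrayBoard):
--     grid = [[arrayBoard[i][j] for j in range(3)] for i in range(2)]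
--     horiz = any(_ok(a, b) for row in grid for a, b in zip(row, row[1:]))
--     vert = any(_ok(a, b) for r1, r2 in zip(grid, grid[1:]) for a, b in zip(r1, r2))
--     return horiz or vert
-- ===== Notes on version B (the rewrite author's own statement) =====
-- stated objective: simpler
-- what changed: B replaces A's sum comparisons by the algebraic identity a+b>a and a+b>b iff a>0 and b>0, folds the zero test into one per-pair predicate (so the separate zero loop disappears), drops A's diagonal branch (redundant: it needs the middle cell to be 0), and scans neighbor pairs generically via zip instead of A's hand-unrolled column/row or-chains.
import Mathlib
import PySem

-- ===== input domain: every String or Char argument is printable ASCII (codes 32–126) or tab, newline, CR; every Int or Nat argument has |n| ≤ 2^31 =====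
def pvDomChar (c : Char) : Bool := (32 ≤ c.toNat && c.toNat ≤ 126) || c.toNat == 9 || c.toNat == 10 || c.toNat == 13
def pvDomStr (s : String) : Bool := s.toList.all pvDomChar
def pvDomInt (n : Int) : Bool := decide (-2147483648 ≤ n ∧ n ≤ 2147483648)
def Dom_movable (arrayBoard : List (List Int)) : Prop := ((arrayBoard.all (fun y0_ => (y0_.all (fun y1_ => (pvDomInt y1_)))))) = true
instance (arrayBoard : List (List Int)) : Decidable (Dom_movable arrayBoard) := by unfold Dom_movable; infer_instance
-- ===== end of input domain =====

-- ===== PORT A =====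
-- B uses the identity (a+b>a ∧ a+b>b ⟺ a>0 ∧ b>0), folds the zero test into one
-- per-pair predicate over zip-generated neighbor pairs, and drops A's redundant
-- diagonal branch (objective: simpler).
def fibA : List Int := [0, 1, 2, 3, 5, 8, 13, 21, 34, 55, 89, 144, 233, 377, 610]

-- one iteration of A's `for i in range(2)` body: the left-right flag for row (x, y, z)
def flagLR (x y z : Int) : Bool :=
  (fibA.contains (x + y) && x + y > x && x + y > y) ||
  (fibA.contains (y + z) && y + z > y && y + z > z) ||
  (fibA.contains (x + z) && x + z > x && x + z > z && y == 0)

def movable (arrayBoard : List (List Int)) : Bool :=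
  match arrayBoard with
  | (a :: b :: c :: _) :: (d :: e :: f :: _) :: _ =>
    let add1 := a + d
    let add2 := b + e
    let add3 := c + f
    let flagUD :=
      (fibA.contains add1 && add1 > a && add1 > d) ||
      (fibA.contains add2 && add2 > b && add2 > e) ||
      (fibA.contains add3 && add3 > c && add3 > f)
    if flagUD then true
    else if flagLR a b c then true                 -- i = 0: left-right flag
    else if a == 0 || b == 0 || c == 0 then true   -- i = 0: inner j loop, zero check
    else if flagLR d e f then true                 -- i = 1
    else if d == 0 || e == 0 || f == 0 then true
    else false
  | _ => false  -- unreachable under Pre_movable (Python raises IndexError here)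

-- ===== PORT B =====
def fibB : List Int := [0, 1, 2, 3, 5, 8, 13, 21, 34, 55, 89, 144, 233, 377, 610]

-- Source B's _ok: pair is productive iff one tile empty, or both positive with Fibonacci sum
def okPair (a b : Int) : Bool :=
  a == 0 || b == 0 || (decide (0 < a) && decide (0 < b) && fibB.contains (a + b))

-- Source B's board extraction: the 2x3 sub-grid (rows 0,1, columns 0..2); under Pre_ this is
-- exactly the comprehension [[arrayBoard[i][j] for j in range(3)] for i in range(2)]
def movable_alt (arrayBoard : List (List Int)) : Bool :=
  let grid := [(arrayBoard.getD 0 []).take 3, (arrayBoard.getD 1 []).take 3]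
  let horiz := grid.any (fun row => (row.zip row.tail).any (fun p => okPair p.1 p.2))
  let vert := (grid.zip grid.tail).any (fun rr => (rr.1.zip rr.2).any (fun p => okPair p.1 p.2))
  horiz || vert

-- ===== PRECONDITION & SPEC =====
-- Pre_ excludes exactly the boards on which A raises IndexError: fewer than 2 rows, or a
-- first or second row with fewer than 3 entries.
def Pre_movable (arrayBoard : List (List Int)) : Prop :=
  2 ≤ arrayBoard.length ∧ 3 ≤ (arrayBoard.getD 0 []).length ∧ 3 ≤ (arrayBoard.getD 1 []).length
instance (arrayBoard : List (List Int)) : Decidable (Pre_movable arrayBoard) := by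
  unfold Pre_movable; infer_instance
def pvWitness_movable : List (List Int) := [[1, 2, 3], [5, 8, 13]]

def Spec_movable (arrayBoard : List (List Int)) (out : Bool) : Prop := out = movable_alt arrayBoard
instance (arrayBoard : List (List Int)) (out : Bool) : Decidable (Spec_movable arrayBoard out) := by
  unfold Spec_movable; infer_instance

-- ===== CLAIM (what is proved, stated in full; the proofs are below) =====
def Claim_equal_movable : Prop := ∀ (arrayBoard : List (List Int)), Dom_movable arrayBoard → Pre_movable arrayBoard → Spec_movable arrayBoard (movable arrayBoard)

-- ===== LEMMAS AND PROOFS =====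
-- A's merge test rewritten into B's positivity form
theorem mergeA_eq (a b : Int) :
    (fibA.contains (a + b) && decide (a + b > a) && decide (a + b > b))
      = (decide (0 < a) && decide (0 < b) && fibA.contains (a + b)) := by
  have h1 : (a + b > a) ↔ (0 < b) := by omega
  have h2 : (a + b > b) ↔ (0 < a) := by omega
  simp only [h1, h2]
  cases decide (0 < a) <;> cases decide (0 < b) <;> cases fibA.contains (a + b) <;> rfl

-- core fact: on any six cells, A's or-chain equals B's uniform pair scan
theorem movable_core (a b c d e f : Int) :
    movable [[a, b, c], [d, e, f]] = movable_alt [[a, b, c], [d, e, f]] := by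
  by_cases hb : b = 0
  · subst hb; simp [movable, movable_alt, okPair]
  · by_cases he : e = 0
    · subst he; simp [movable, movable_alt, okPair]
    · have hb' : (b == 0) = false := by simp [hb]
      have he' : (e == 0) = false := by simp [he]
      simp only [movable, movable_alt, flagLR, okPair, hb', he', List.getD,
        List.getElem?_cons_zero, List.getElem?_cons_succ, Option.getD_some,
        List.take, List.zip, List.zipWith, List.tail, List.any_cons, List.any_nil,
        mergeA_eq, Bool.and_false, Bool.false_or, Bool.or_false,
        show fibB = fibA from rfl]
      generalize (decide (0 < a) && decide (0 < d) && fibA.contains (a + d)) = q1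
      generalize (decide (0 < b) && decide (0 < e) && fibA.contains (b + e)) = q2
      generalize (decide (0 < c) && decide (0 < f) && fibA.contains (c + f)) = q3
      generalize (decide (0 < a) && decide (0 < b) && fibA.contains (a + b)) = q4
      generalize (decide (0 < b) && decide (0 < c) && fibA.contains (b + c)) = q5
      generalize (decide (0 < d) && decide (0 < e) && fibA.contains (d + e)) = q6
      generalize (decide (0 < e) && decide (0 < f) && fibA.contains (e + f)) = q7
      generalize (a == 0) = za
      generalize (c == 0) = zc
      generalize (d == 0) = zd
      generalize (f == 0) = zf
      revert q1 q2 q3 q4 q5 q6 q7 za zc zd zf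
      decide

-- ===== VERDICT (by name: the statement is the Claim_ definition above) =====
theorem movable_spec : Claim_equal_movable := by
  intro arrayBoard _ hpre
  unfold Spec_movable
  match arrayBoard with
  | [] => simp [Pre_movable] at hpre
  | [_] => simp [Pre_movable] at hpre
  | r0 :: r1 :: rest =>
    match r0, r1 with
    | a :: b :: c :: t0, d :: e :: f :: t1 =>
      have hA : movable ((a :: b :: c :: t0) :: (d :: e :: f :: t1) :: rest)
          = movable [[a, b, c], [d, e, f]] := rfl
      have hB : movable_alt ((a :: b :: c :: t0) :: (d :: e :: f :: t1) :: rest)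
          = movable_alt [[a, b, c], [d, e, f]] := rfl
      rw [hA, hB, movable_core]
    | [], _ => simp [Pre_movable] at hpre
    | [_], _ => simp [Pre_movable] at hpre
    | [_, _], _ => simp [Pre_movable] at hpre
    | _ :: _ :: _ :: _, [] => simp [Pre_movable] at hpre
    | _ :: _ :: _ :: _, [_] => simp [Pre_movable] at hpre
    | _ :: _ :: _ :: _, [_, _] => simp [Pre_movable] at hpre
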